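-- pv_equiv track=rewrite | github.com/abhishekbhave26/Coding-Portfolio | Python/planeSeatReservation.py | solution
-- ===== SOURCE A (Python) =====
-- def solution(N, S):
--     # write your code in Python 3.6
--     if(N==1 and S==''):
--         return 3
--     S=S.split()
--     fam=0
--     new=['A','B','C','D','E','F','G','H','J','K']
--     for i in range(0,N):
--         count=0
--         for j in range(0,len(new)):
--             if(j=='A' or j=='D' or j=='H'):
--                 count=0
--             x=str(i)+str(new[j])
--             if x in S:
--                 count=0
--             elif(count==3):
--                 fam+=1
--             else:
--                 count+=1
--     return int(fam/3)
-- ===== SOURCE B (Python) =====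
-- def solution(N, S):
--     if N == 1 and S == '':
--         return 3
--     occupied = set(S.split())
--     fam = 0
--     for i in range(N):
--         free = [str(i) + c not in occupied for c in 'ABCDEFGHJK']
--         fam += sum(all(free[j:j+4]) for j in range(7))
--     return fam // 3
-- ===== Notes on version B (the rewrite author's own statement) =====
-- stated objective: alternative
-- what changed: B replaces A's seat-by-seat running-counter state machine (with its dead int-vs-str branch) by a per-row occupancy list plus a sliding-window count: it adds 1 for each of the 7 four-seat windows that is entirely free, which equals A's per-run counter total; the final int(fam/3) becomes fam // 3.
import Mathlib
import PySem

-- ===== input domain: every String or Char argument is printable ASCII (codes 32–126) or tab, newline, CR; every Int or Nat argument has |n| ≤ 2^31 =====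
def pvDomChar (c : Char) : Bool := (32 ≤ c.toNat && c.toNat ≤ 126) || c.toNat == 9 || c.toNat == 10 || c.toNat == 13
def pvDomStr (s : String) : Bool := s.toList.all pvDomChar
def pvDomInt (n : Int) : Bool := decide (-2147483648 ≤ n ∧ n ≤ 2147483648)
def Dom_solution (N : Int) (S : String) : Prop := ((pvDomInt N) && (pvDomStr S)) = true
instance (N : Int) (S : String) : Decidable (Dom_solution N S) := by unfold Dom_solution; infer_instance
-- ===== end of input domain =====

-- B replaces A's seat-by-seat running-counter state machine by a per-row occupancy list and a
-- sliding four-seat-window count (an alternative decomposition of the same computation).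


-- ===== PORT A =====
def solution (N : Int) (S : String) : Int :=
  if N == 1 && S == "" then 3
  else
    let Sl := PySem.Str.split₀ S
    let new : List String := ["A", "B", "C", "D", "E", "F", "G", "H", "J", "K"]
    let fam : Int :=
      (PySem.List.pyRange 0 N 1).foldl (fun fam i =>
        ((PySem.List.pyRange 0 (new.length : Int) 1).foldl
          (fun (st : Int × Int) j =>
            -- `if(j=='A' or j=='D' or j=='H')` compares the int j with strings: always False in Python
            let count : Int := if False then 0 else st.2
            -- new[j]: j is always in range here (j < len(new)), so pyGetD is exact; str of a str is itself
            let x := PySem.Int.toStr i ++ PySem.List.pyGetD new j ""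
            if Sl.contains x then (st.1, 0)
            else if count == 3 then (st.1 + 1, count)
            else (st.1, count + 1))
          (fam, 0)).1) 0
    -- int(fam/3): fam ≥ 0 here, so this is floor division (float division is integer-exact on this range)
    PySem.Int.floordiv fam 3

-- ===== PORT B =====
def solution_alt (N : Int) (S : String) : Int :=
  if N == 1 && S == "" then 3
  else
    let occupied := PySem.Set.ofList (PySem.Str.split₀ S)
    let fam : Int :=
      (PySem.List.pyRange 0 N 1).foldl (fun fam i =>
        let free : List Bool := "ABCDEFGHJK".toList.map (fun c =>
          !(PySem.Set.contains occupied (PySem.Int.toStr i ++ String.ofList [c])))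
        fam + ((PySem.List.pyRange 0 7 1).map (fun j =>
          if (PySem.List.slice free (some j) (some (j + 4))).all (fun b => b) then (1 : Int) else 0)).sum) 0
    PySem.Int.floordiv fam 3

-- ===== PRECONDITION & SPEC =====
def Spec_solution (N : Int) (S : String) (out : Int) : Prop := out = solution_alt N S
instance (N : Int) (S : String) (out : Int) : Decidable (Spec_solution N S out) := by unfold Spec_solution; infer_instance

-- ===== CLAIM (what is proved, stated in full; the proofs are below) =====
def Claim_equal_solution : Prop := ∀ (N : Int) (S : String), Dom_solution N S → Spec_solution N S (solution N S)

-- ===== LEMMAS AND PROOFS =====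

-- A's inner-loop step as a function of the occupancy flag of the current seat
def pvStepA (st : Int × Int) (occ : Bool) : Int × Int :=
  if occ then (st.1, 0) else if st.2 == 3 then (st.1 + 1, st.2) else (st.1, st.2 + 1)

-- A's per-row family increment, computed from the row's 10 occupancy flags
def pvRowA (bs : List Bool) : Int := (bs.foldl pvStepA (0, 0)).1

-- B's per-row family increment, computed from the same flags
def pvRowB (bs : List Bool) : Int :=
  ((PySem.List.pyRange 0 7 1).map (fun j =>
    if (PySem.List.slice (bs.map (fun b => !b)) (some j) (some (j + 4))).all (fun b => b)
    then (1 : Int) else 0)).sum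

-- the row's occupancy flags
def pvFlags (Sl : List String) (i : Int) : List Bool :=
  ["A", "B", "C", "D", "E", "F", "G", "H", "J", "K"].map
    (fun L => Sl.contains (PySem.Int.toStr i ++ L))

-- the occupancy test A's inner loop performs at seat index j of row i
def pvH (Sl : List String) (i : Int) (j : Int) : Bool :=
  Sl.contains (PySem.Int.toStr i ++
    PySem.List.pyGetD ["A", "B", "C", "D", "E", "F", "G", "H", "J", "K"] j "")

lemma pvFoldA_shift (bs : List Bool) (fam c : Int) :
    bs.foldl pvStepA (fam, c) =
      (fam + (bs.foldl pvStepA (0, c)).1, (bs.foldl pvStepA (0, c)).2) := by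
  induction bs generalizing fam c with
  | nil => simp
  | cons b t ih =>
    simp only [List.foldl_cons]
    cases b with
    | true =>
      simp only [pvStepA]
      exact ih fam 0
    | false =>
      by_cases hc : (c == 3) = true
      · simp only [pvStepA, Bool.false_eq_true, if_false, hc, if_pos]
        rw [ih (fam + 1) c, ih (0 + 1) c]
        simp [add_assoc]
      · simp only [pvStepA, Bool.false_eq_true, if_false, hc]
        exact ih fam (c + 1)

lemma pvRowB_expl (b0 b1 b2 b3 b4 b5 b6 b7 b8 b9 : Bool) :
    pvRowB [b0, b1, b2, b3, b4, b5, b6, b7, b8, b9] =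
      (if !b0 && (!b1 && (!b2 && (!b3 && true))) then (1 : Int) else 0) +
      ((if !b1 && (!b2 && (!b3 && (!b4 && true))) then (1 : Int) else 0) +
      ((if !b2 && (!b3 && (!b4 && (!b5 && true))) then (1 : Int) else 0) +
      ((if !b3 && (!b4 && (!b5 && (!b6 && true))) then (1 : Int) else 0) +
      ((if !b4 && (!b5 && (!b6 && (!b7 && true))) then (1 : Int) else 0) +
      ((if !b5 && (!b6 && (!b7 && (!b8 && true))) then (1 : Int) else 0) +
      ((if !b6 && (!b7 && (!b8 && (!b9 && true))) then (1 : Int) else 0) + 0)))))) := by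
  rfl

lemma pvRow_eq : ∀ b0 b1 b2 b3 b4 b5 b6 b7 b8 b9 : Bool,
    pvRowA [b0, b1, b2, b3, b4, b5, b6, b7, b8, b9] =
    pvRowB [b0, b1, b2, b3, b4, b5, b6, b7, b8, b9] := by
  simp only [pvRowB_expl]
  decide

lemma pvRow_flags (Sl : List String) (i : Int) :
    pvRowA (pvFlags Sl i) = pvRowB (pvFlags Sl i) := by
  have h : pvFlags Sl i =
      [Sl.contains (PySem.Int.toStr i ++ "A"), Sl.contains (PySem.Int.toStr i ++ "B"),
       Sl.contains (PySem.Int.toStr i ++ "C"), Sl.contains (PySem.Int.toStr i ++ "D"),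
       Sl.contains (PySem.Int.toStr i ++ "E"), Sl.contains (PySem.Int.toStr i ++ "F"),
       Sl.contains (PySem.Int.toStr i ++ "G"), Sl.contains (PySem.Int.toStr i ++ "H"),
       Sl.contains (PySem.Int.toStr i ++ "J"), Sl.contains (PySem.Int.toStr i ++ "K")] := rfl
  rw [h]
  exact pvRow_eq _ _ _ _ _ _ _ _ _ _

lemma pvContains (Sl : List String) (x : String) :
    PySem.Set.contains (PySem.Set.ofList Sl) x = Sl.contains x := by
  rw [Bool.eq_iff_iff]
  simp [PySem.Set.mem_ofList]

lemma pvInnerA (Sl : List String) (i fam : Int) :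
    (List.foldl (fun st j => pvStepA st (pvH Sl i j)) (fam, 0)
        (PySem.List.pyRange 0
          ((["A", "B", "C", "D", "E", "F", "G", "H", "J", "K"] : List String).length : Int) 1)).1
      = fam + pvRowA (pvFlags Sl i) := by
  rw [← List.foldl_map]
  rw [show PySem.List.pyRange 0
        ((["A", "B", "C", "D", "E", "F", "G", "H", "J", "K"] : List String).length : Int) 1
      = [0, 1, 2, 3, 4, 5, 6, 7, 8, 9] from by decide]
  rw [show ([0, 1, 2, 3, 4, 5, 6, 7, 8, 9] : List Int).map (pvH Sl i) = pvFlags Sl i from by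
    simp only [List.map_cons, List.map_nil, pvH, pvFlags]
    rw [show PySem.List.pyGetD ["A","B","C","D","E","F","G","H","J","K"] (0:Int) "" = "A" from by decide,
        show PySem.List.pyGetD ["A","B","C","D","E","F","G","H","J","K"] (1:Int) "" = "B" from by decide,
        show PySem.List.pyGetD ["A","B","C","D","E","F","G","H","J","K"] (2:Int) "" = "C" from by decide,
        show PySem.List.pyGetD ["A","B","C","D","E","F","G","H","J","K"] (3:Int) "" = "D" from by decide,
        show PySem.List.pyGetD ["A","B","C","D","E","F","G","H","J","K"] (4:Int) "" = "E" from by decide,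
        show PySem.List.pyGetD ["A","B","C","D","E","F","G","H","J","K"] (5:Int) "" = "F" from by decide,
        show PySem.List.pyGetD ["A","B","C","D","E","F","G","H","J","K"] (6:Int) "" = "G" from by decide,
        show PySem.List.pyGetD ["A","B","C","D","E","F","G","H","J","K"] (7:Int) "" = "H" from by decide,
        show PySem.List.pyGetD ["A","B","C","D","E","F","G","H","J","K"] (8:Int) "" = "J" from by decide,
        show PySem.List.pyGetD ["A","B","C","D","E","F","G","H","J","K"] (9:Int) "" = "K" from by decide]]
  rw [pvFoldA_shift]
  rfl

lemma pvInnerB (Sl : List String) (i : Int) :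
    "ABCDEFGHJK".toList.map (fun c =>
        !(PySem.Set.contains (PySem.Set.ofList Sl) (PySem.Int.toStr i ++ String.ofList [c])))
      = (pvFlags Sl i).map (fun b => !b) := by
  rw [show "ABCDEFGHJK".toList = ['A','B','C','D','E','F','G','H','J','K'] from rfl]
  simp only [List.map_cons, List.map_nil, pvFlags, pvContains]

lemma pvMain (N : Int) (S : String) : solution N S = solution_alt N S := by
  unfold solution solution_alt
  cases hg : (N == 1 && S == "") with
  | true => simp
  | false =>
    simp only [Bool.false_eq_true, if_false]
    congr 1
    apply congrArg (fun f => List.foldl f (0 : Int) (PySem.List.pyRange 0 N 1))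
    funext fam i
    calc ((PySem.List.pyRange 0
            ((["A", "B", "C", "D", "E", "F", "G", "H", "J", "K"] : List String).length : Int) 1).foldl
          (fun (st : Int × Int) j =>
            let count : Int := if False then 0 else st.2
            let x := PySem.Int.toStr i ++ PySem.List.pyGetD ["A", "B", "C", "D", "E", "F", "G", "H", "J", "K"] j ""
            if (PySem.Str.split₀ S).contains x then (st.1, 0)
            else if count == 3 then (st.1 + 1, count)
            else (st.1, count + 1))
          (fam, 0)).1
        = fam + pvRowA (pvFlags (PySem.Str.split₀ S) i) := pvInnerA (PySem.Str.split₀ S) i fam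
      _ = fam + pvRowB (pvFlags (PySem.Str.split₀ S) i) := by
            rw [pvRow_flags]
      _ = fam + ((PySem.List.pyRange 0 7 1).map (fun j =>
            if (PySem.List.slice ("ABCDEFGHJK".toList.map (fun c =>
                !(PySem.Set.contains (PySem.Set.ofList (PySem.Str.split₀ S))
                  (PySem.Int.toStr i ++ String.ofList [c])))) (some j) (some (j + 4))).all (fun b => b)
            then (1 : Int) else 0)).sum := by
            rw [pvInnerB]
            rfl

-- ===== VERDICT (by name: the statement is the Claim_ definition above) =====
theorem solution_spec : Claim_equal_solution := by
  intro N S _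
  exact pvMain N S
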